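-- pv_equiv track=rewrite | github.com/gbud/Fundamentals-of-CS-and-Programming | week11_midterm2/practice_midterm2.py | islandWrapper
-- ===== SOURCE A (Python) =====
-- def islandWrapper(L, islands):
--     if len(L) == 2: return islands
--     else:
--         if ((L[0]%2==0 and L[1]%2==1 and L[2]%2==0) or
--             (L[0]%2==1 and L[1]%2==0 and L[2]%2==1)):
--             islands.append(L[1])
--             return islandWrapper(L[1:], islands)
--         else: return islandWrapper(L[1:], islands)
-- ===== SOURCE B (Python) =====
-- def islandWrapper(L, islands):
--     # zip-based single pass over consecutive triples; appends each middle
--     # element whose neighbours both differ from it in parity, then returns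
--     # the (mutated) islands accumulator.
--     islands.extend(y for x, y, z in zip(L, L[1:], L[2:])
--                    if x % 2 != y % 2 and y % 2 != z % 2)
--     return islands
-- ===== Notes on version B (the rewrite author's own statement) =====
-- stated objective: faster
-- what changed: replaces A's tail recursion on repeatedly re-sliced lists (with an explicit two-case even/odd disjunction) by one idiomatic pass over zip(L, L[1:], L[2:]) extending islands with middles of unequal-parity triples
import Mathlib
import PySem

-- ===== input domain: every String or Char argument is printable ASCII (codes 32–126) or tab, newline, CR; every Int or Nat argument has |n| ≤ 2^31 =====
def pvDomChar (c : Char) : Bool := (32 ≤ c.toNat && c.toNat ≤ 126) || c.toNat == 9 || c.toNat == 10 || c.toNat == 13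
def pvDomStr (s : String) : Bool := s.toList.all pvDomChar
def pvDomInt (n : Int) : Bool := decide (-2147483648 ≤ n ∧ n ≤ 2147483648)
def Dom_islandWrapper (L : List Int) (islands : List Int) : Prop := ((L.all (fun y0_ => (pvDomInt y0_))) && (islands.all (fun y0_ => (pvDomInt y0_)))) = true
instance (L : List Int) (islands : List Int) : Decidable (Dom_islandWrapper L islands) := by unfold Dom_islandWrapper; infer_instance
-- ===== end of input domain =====

-- B replaces A's tail recursion on re-sliced lists by one idiomatic zip pass
-- extending the islands accumulator (return value only; both Pythons mutate islands in place).

-- ===== PORT A =====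
def islandWrapper (L : List Int) (islands : List Int) : List Int :=
  if L.length == 2 then islands
  else
    match L with
    | x :: y :: z :: t =>
        if (PySem.Int.mod x 2 == 0 && PySem.Int.mod y 2 == 1 && PySem.Int.mod z 2 == 0) ||
           (PySem.Int.mod x 2 == 1 && PySem.Int.mod y 2 == 0 && PySem.Int.mod z 2 == 1)
        then islandWrapper (y :: z :: t) (islands ++ [y])   -- L[1:]
        else islandWrapper (y :: z :: t) islands
    | _ => islands   -- Python raises IndexError here (lists of length 0 or 1); excluded by Pre_

-- ===== PORT B =====
def islandWrapper_alt (L : List Int) (islands : List Int) : List Int :=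
  islands ++ (((L.zip (L.drop 1)).zip (L.drop 2)).filterMap fun t =>
    if PySem.Int.mod t.1.1 2 ≠ PySem.Int.mod t.1.2 2 ∧ PySem.Int.mod t.1.2 2 ≠ PySem.Int.mod t.2 2
    then some t.1.2 else none)

-- ===== PRECONDITION & SPEC =====
-- Pre_ excludes lists of length 0 or 1, on which A raises IndexError.
def Pre_islandWrapper (L : List Int) (islands : List Int) : Prop := 2 ≤ L.length
instance (L : List Int) (islands : List Int) : Decidable (Pre_islandWrapper L islands) := by unfold Pre_islandWrapper; infer_instance
def pvWitness_islandWrapper : List Int × List Int := ([2, 3, 4, 7], [0])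

def Spec_islandWrapper (L : List Int) (islands : List Int) (out : List Int) : Prop := out = islandWrapper_alt L islands
instance (L : List Int) (islands : List Int) (out : List Int) : Decidable (Spec_islandWrapper L islands out) := by unfold Spec_islandWrapper; infer_instance

-- ===== CLAIM (what is proved, stated in full; the proofs are below) =====
def Claim_equal_islandWrapper : Prop := ∀ (L : List Int) (islands : List Int), Dom_islandWrapper L islands → Pre_islandWrapper L islands → Spec_islandWrapper L islands (islandWrapper L islands)

-- ===== LEMMAS AND PROOFS =====

-- A's (even,odd,even)-or-(odd,even,odd) test is exactly B's alternating-parity test.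
lemma cond_iff (x y z : Int) :
    (((PySem.Int.mod x 2 == 0 && PySem.Int.mod y 2 == 1 && PySem.Int.mod z 2 == 0) ||
      (PySem.Int.mod x 2 == 1 && PySem.Int.mod y 2 == 0 && PySem.Int.mod z 2 == 1)) = true)
    ↔ (x % 2 ≠ y % 2 ∧ y % 2 ≠ z % 2) := by
  have hx : x % 2 = 0 ∨ x % 2 = 1 := Int.emod_two_eq x
  have hy : y % 2 = 0 ∨ y % 2 = 1 := Int.emod_two_eq y
  have hz : z % 2 = 0 ∨ z % 2 = 1 := Int.emod_two_eq z
  have hm : ∀ a : Int, PySem.Int.mod a 2 = a % 2 := fun a => PySem.Int.mod_eq_emod_of_pos (by norm_num)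
  simp only [hm]
  rcases hx with hx | hx <;> rcases hy with hy | hy <;> rcases hz with hz | hz <;>
    simp [hx, hy, hz]

lemma key : ∀ (L : List Int) (islands : List Int), 2 ≤ L.length →
    islandWrapper L islands = islandWrapper_alt L islands := by
  intro L
  induction L with
  | nil => intro islands h; simp at h
  | cons x xs ih =>
    intro islands h
    match xs with
    | [] => simp at h
    | [y] => simp [islandWrapper, islandWrapper_alt]
    | y :: z :: t =>
      have hlen : 2 ≤ (y :: z :: t).length := by simp
      rw [islandWrapper]
      rw [if_neg (by simp)]
      by_cases hc : (x % 2 ≠ y % 2 ∧ y % 2 ≠ z % 2)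
      · rw [if_pos ((cond_iff x y z).mpr hc), ih _ hlen]
        simp [islandWrapper_alt, hc]
      · rw [if_neg (fun hb => hc ((cond_iff x y z).mp hb)), ih _ hlen]
        simp [islandWrapper_alt, hc]

-- ===== VERDICT (by name: the statement is the Claim_ definition above) =====
theorem islandWrapper_spec : Claim_equal_islandWrapper := by
  intro L islands _ hpre
  exact key L islands hpre
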